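-- pv_equiv track=rewrite | github.com/mmartyna123/codewars | 6kyu/Numbers of Letters of Numbers.py | numbers_of_letters
-- ===== SOURCE A (Python) =====
-- def numbers_of_letters(n):
--     digits_to_words = {
--         0:'zero', 1:'one', 2: 'two', 3:'three', 4:'four', 5:'five', 6:'six', 7:'seven',
--         8:'eight', 9:'nine'
--     }
--     res = []
--     def number_to_word(number):
--         return ''.join(digits_to_words[int(digit)] for digit in str(number))
--     word = number_to_word(n)
--     while True:
--         res.append(word)
--         word_length = len(word)
--         new_word = number_to_word(word_length)
--         if new_word == word:
--             break
--         else: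
--             word = new_word
--     return res
-- ===== SOURCE B (Python) =====
-- def numbers_of_letters(n):
--     WORDS = ('zero', 'one', 'two', 'three', 'four', 'five',
--              'six', 'seven', 'eight', 'nine')
--
--     def spell(k):
--         return ''.join(WORDS[int(c)] for c in str(k))
--
--     # The map k -> len(spell(k)) has exactly one fixed point, 4 ('four' has 4
--     # letters), and strictly decreases above it, so every chain ends at 4:
--     # recurse with the base case k == 4 instead of comparing consecutive words.
--     def chain(k):
--         w = spell(k)
--         return [w] if k == 4 else [w, *chain(len(w))]
--
--     return chain(n)
-- ===== Notes on version B (the rewrite author's own statement) =====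
-- stated objective: simpler
-- what changed: A loops imperatively, building each next word and comparing whole strings to detect stabilisation; B is a short pure recursion whose base case is the mathematical fixed point k == 4 of the length map (the only number spelled with as many letters as its value), so no word comparison or mutable state is needed.
import Mathlib
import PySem

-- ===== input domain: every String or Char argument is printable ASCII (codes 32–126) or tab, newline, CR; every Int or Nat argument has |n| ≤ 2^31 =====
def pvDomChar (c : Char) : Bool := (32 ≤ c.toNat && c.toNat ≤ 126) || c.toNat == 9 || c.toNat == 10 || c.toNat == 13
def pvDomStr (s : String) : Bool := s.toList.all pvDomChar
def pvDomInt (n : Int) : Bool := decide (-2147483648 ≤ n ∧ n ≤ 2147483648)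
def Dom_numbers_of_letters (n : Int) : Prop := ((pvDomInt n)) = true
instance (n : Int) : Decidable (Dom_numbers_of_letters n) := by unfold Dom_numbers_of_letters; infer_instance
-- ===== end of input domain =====

-- B replaces A's imperative word-comparison loop by a pure recursion whose base case is
-- the unique fixed point 4 of the spelled-length map (objective: simpler).

-- ===== PORT A =====
-- dict {0:'zero', …, 9:'nine'}
def pvDigitsToWords : PySem.Dict Int String :=
  PySem.Dict.ofList [(0, "zero"), (1, "one"), (2, "two"), (3, "three"), (4, "four"),
                     (5, "five"), (6, "six"), (7, "seven"), (8, "eight"), (9, "nine")]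

-- number_to_word: ''.join(digits_to_words[int(digit)] for digit in str(number)).
-- The .getD fallbacks are totality guards only: inside Pre_ every digit char is '0'..'9',
-- so int(digit) succeeds and the dict key exists (outside Pre_ the Python raises ValueError).
def pvNumberToWord (number : Int) : String :=
  PySem.Str.join "" ((PySem.Int.toStr number).toList.map (fun digit =>
    PySem.Dict.getD pvDigitsToWords ((PySem.Int.ofChars? [digit]).getD 0) ""))

-- the 'while True' loop of A; fuel is a totality guard only (never exhausted on Dom ∩ Pre_)
def pvLoopA (fuel : Nat) (word : String) : List String :=
  match fuel with
  | 0 => [word]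
  | fuel + 1 =>
    let wordLength : Int := PySem.Str.len word
    let newWord := pvNumberToWord wordLength
    if newWord == word then [word] else word :: pvLoopA fuel newWord

def numbers_of_letters (n : Int) : List String :=
  pvLoopA 64 (pvNumberToWord n)

-- ===== PORT B =====
def pvWords : List String :=
  ["zero", "one", "two", "three", "four", "five", "six", "seven", "eight", "nine"]

-- spell(k): ''.join(WORDS[int(c)] for c in str(k)); .getD are totality guards as in A
def pvSpell (k : Int) : String :=
  PySem.Str.join "" ((PySem.Int.toStr k).toList.map (fun c =>
    (PySem.List.pyGet? pvWords ((PySem.Int.ofChars? [c]).getD 0)).getD ""))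

-- chain(k): [w] if k == 4 else [w, *chain(len(w))]; fuel is a totality guard only
def pvChain (fuel : Nat) (k : Int) : List String :=
  match fuel with
  | 0 => [pvSpell k]
  | fuel + 1 =>
    let w := pvSpell k
    if k == 4 then [w] else w :: pvChain fuel (PySem.Str.len w)

def numbers_of_letters_alt (n : Int) : List String :=
  pvChain 64 n

-- ===== PRECONDITION & SPEC =====
-- Negative inputs are excluded: there str() yields a leading minus sign, whose int() conversion raises ValueError in both programs.
def Pre_numbers_of_letters (n : Int) : Prop := 0 ≤ n
instance (n : Int) : Decidable (Pre_numbers_of_letters n) := by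
  unfold Pre_numbers_of_letters; infer_instance

def pvWitness_numbers_of_letters : Int := (7)

def Spec_numbers_of_letters (n : Int) (out : List String) : Prop := out = numbers_of_letters_alt n
instance (n : Int) (out : List String) : Decidable (Spec_numbers_of_letters n out) := by
  unfold Spec_numbers_of_letters; infer_instance

-- ===== CLAIM (what is proved, stated in full; the proofs are below) =====
def Claim_equal_numbers_of_letters : Prop :=
  ∀ (n : Int), Dom_numbers_of_letters n → Pre_numbers_of_letters n →
    Spec_numbers_of_letters n (numbers_of_letters n)

-- ===== LEMMAS AND PROOFS =====

-- every char str() produces for a nonnegative number is a decimal digit char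
lemma toDigitsCore_chars (b : Nat) (hb : 2 ≤ b) :
    ∀ (f n : Nat) (ds : List Char) (c : Char), c ∈ Nat.toDigitsCore b f n ds →
      c ∈ ds ∨ ∃ d, d < b ∧ c = Nat.digitChar d := by
  intro f
  induction f with
  | zero => intro n ds c hc; exact Or.inl hc
  | succ f ih =>
    intro n ds c hc
    simp only [Nat.toDigitsCore] at hc
    split at hc
    · rcases List.mem_cons.mp hc with h | h
      · exact Or.inr ⟨n % b, Nat.mod_lt _ (by omega), h⟩
      · exact Or.inl h
    · rcases ih _ _ _ hc with h | h
      · rcases List.mem_cons.mp h with h' | h'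
        · exact Or.inr ⟨n % b, Nat.mod_lt _ (by omega), h'⟩
        · exact Or.inl h'
      · exact Or.inr h

lemma toChars_digits (n : Int) (hn : 0 ≤ n) :
    ∀ c ∈ PySem.Int.toChars n, ∃ d, d < 10 ∧ c = Nat.digitChar d := by
  intro c hc
  simp only [PySem.Int.toChars, if_neg (by omega : ¬ n < 0)] at hc
  rcases toDigitsCore_chars 10 (by omega) _ _ _ _ hc with h | h
  · simp at h
  · exact h

-- length of toDigitsCore output (totals): at least ds + 1 when fuel > 0
lemma toDigitsCore_len_ge (b : Nat) :
    ∀ (f n : Nat) (ds : List Char),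
      ds.length ≤ (Nat.toDigitsCore b f n ds).length ∧
      (0 < f → ds.length + 1 ≤ (Nat.toDigitsCore b f n ds).length) := by
  intro f
  induction f with
  | zero => intro n ds; simp [Nat.toDigitsCore]
  | succ f ih =>
    intro n ds
    simp only [Nat.toDigitsCore]
    split
    · simp
    · have h := ih (n / b) (Nat.digitChar (n % b) :: ds)
      simp only [List.length_cons] at h
      exact ⟨by omega, fun _ => by omega⟩

lemma toChars_len_pos (n : Int) (hn : 0 ≤ n) : 1 ≤ (PySem.Int.toChars n).length := by
  simp only [PySem.Int.toChars, if_neg (by omega : ¬ n < 0), Nat.toDigits]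
  exact (toDigitsCore_len_ge 10 _ _ []).2 (by omega)

lemma toChars_len_le_ten (n : Int) (hn : 0 ≤ n) (hb : n ≤ 2147483648) :
    (PySem.Int.toChars n).length ≤ 10 := by
  simp only [PySem.Int.toChars, if_neg (by omega : ¬ n < 0)]
  exact Nat.toDigits_length 10 n.toNat 10 (by omega) (by omega)

-- the per-digit word: A's dict lookup and B's list lookup agree on digit chars
def pvDigitWord (c : Char) : String :=
  PySem.Dict.getD pvDigitsToWords ((PySem.Int.ofChars? [c]).getD 0) ""

lemma digit_lookup_eq (d : Nat) (hd : d < 10) :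
    (PySem.List.pyGet? pvWords ((PySem.Int.ofChars? [Nat.digitChar d]).getD 0)).getD ""
      = pvDigitWord (Nat.digitChar d) := by
  interval_cases d <;> decide

lemma digit_word_len (d : Nat) (hd : d < 10) :
    3 ≤ (pvDigitWord (Nat.digitChar d)).toList.length ∧
      (pvDigitWord (Nat.digitChar d)).toList.length ≤ 5 := by
  interval_cases d <;> decide

-- B's spell equals A's number_to_word on nonnegative numbers
lemma spell_eq (k : Int) (hk : 0 ≤ k) : pvSpell k = pvNumberToWord k := by
  unfold pvSpell pvNumberToWord
  congr 1
  apply List.map_congr_left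
  intro c hc
  rw [PySem.Int.toList_toStr] at hc
  rcases toChars_digits k hk c hc with ⟨d, hd, rfl⟩
  exact digit_lookup_eq d hd

-- join with empty separator: length is the sum of the part lengths
lemma join_nil_length (ls : List (List Char)) :
    (PySem.Chars.join [] ls).length = (ls.map List.length).sum := by
  induction ls with
  | nil => simp [PySem.Chars.join_nil]
  | cons p rest ih =>
    cases rest with
    | nil => simp [PySem.Chars.join, List.intercalate]
    | cons q rest' =>
      rw [PySem.Chars.join_cons_cons]
      simp only [List.length_append, List.length_nil, List.map_cons, List.sum_cons] at *
      omega

lemma numberToWord_len (k : Int) :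
    (pvNumberToWord k).toList.length
      = (((PySem.Int.toChars k).map (fun c => (pvDigitWord c).toList.length))).sum := by
  unfold pvNumberToWord
  rw [PySem.Str.toList_join]
  have h0 : "".toList = ([] : List Char) := rfl
  rw [h0, join_nil_length]
  simp [List.map_map, PySem.Int.toList_toStr, Function.comp_def, pvDigitWord,
        String.length_toList]

-- bounds: 3·digits ≤ len(word k) ≤ 5·digits
lemma sum_digit_word_len_bounds (cs : List Char)
    (h : ∀ c ∈ cs, ∃ d, d < 10 ∧ c = Nat.digitChar d) :
    3 * cs.length ≤ (cs.map (fun c => (pvDigitWord c).toList.length)).sum ∧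
      (cs.map (fun c => (pvDigitWord c).toList.length)).sum ≤ 5 * cs.length := by
  induction cs with
  | nil => simp
  | cons c cs ih =>
    rcases h c (List.mem_cons_self ..) with ⟨d, hd, rfl⟩
    have hw := digit_word_len d hd
    have ih' := ih (fun c hc => h c (List.mem_cons_of_mem _ hc))
    simp only [List.map_cons, List.sum_cons, List.length_cons]
    omega

lemma word_len_bounds (k : Int) (hk : 0 ≤ k) :
    3 * (PySem.Int.toChars k).length ≤ (pvNumberToWord k).toList.length ∧
      (pvNumberToWord k).toList.length ≤ 5 * (PySem.Int.toChars k).length := by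
  rw [numberToWord_len]
  exact sum_digit_word_len_bounds _ (toChars_digits k hk)

-- the only fixed point of the length map below 51 is 4
set_option maxHeartbeats 2000000 in
lemma fixed_point_four :
    ∀ l : Nat, l < 51 → PySem.Str.len (pvNumberToWord (l : Int)) = (l : Int) → l = 4 := by
  decide

-- the length map has no fixed point other than 4 anywhere on the domain
lemma fix_iff_four (cur : Int) (h0 : 0 ≤ cur) (h1 : cur ≤ 2147483648) :
    (PySem.Str.len (pvNumberToWord cur) = cur ↔ cur = 4) := by
  constructor
  · intro hfix
    have hb := word_len_bounds cur h0
    have hd10 := toChars_len_le_ten cur h0 h1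
    have hlen : PySem.Str.len (pvNumberToWord cur) = ((pvNumberToWord cur).toList.length : Int) := by
      rw [PySem.Str.len_eq]
    have hcur50 : cur ≤ 50 := by omega
    have := fixed_point_four cur.toNat (by omega)
    have hcast : ((cur.toNat : Nat) : Int) = cur := by omega
    rw [hcast] at this
    have := this hfix
    omega
  · intro h; rw [h]; decide

lemma word_four (k : Int) (hk0 : 0 ≤ k) (hk9 : k ≤ 9)
    (h : pvNumberToWord k = pvNumberToWord 4) : k = 4 := by
  interval_cases k <;> revert h <;> decide

lemma toChars_len_ge_two (n : Int) (hn : 10 ≤ n) : 2 ≤ (PySem.Int.toChars n).length := by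
  simp only [PySem.Int.toChars, if_neg (by omega : ¬ n < 0), Nat.toDigits]
  have h10 : 10 ≤ n.toNat := by omega
  show 2 ≤ (Nat.toDigitsCore 10 (n.toNat + 1) n.toNat []).length
  simp only [Nat.toDigitsCore]
  have : ¬ n.toNat / 10 = 0 := by
    intro h; have := Nat.div_eq_zero_iff.mp h; omega
  rw [if_neg this]
  have h := (toDigitsCore_len_ge 10 n.toNat (n.toNat / 10) [Nat.digitChar (n.toNat % 10)]).2
    (by omega)
  simpa using h

-- A's stopping test (next word equals current word) holds iff the length is a fixed point
lemma stop_iff (cur : Int) (h0 : 0 ≤ cur) (h1 : cur ≤ 2147483648) :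
    (pvNumberToWord (PySem.Str.len (pvNumberToWord cur)) = pvNumberToWord cur
      ↔ PySem.Str.len (pvNumberToWord cur) = cur) := by
  constructor
  · intro hEq
    set l : Int := PySem.Str.len (pvNumberToWord cur) with hl
    have hlen : l = ((pvNumberToWord cur).toList.length : Int) := by
      rw [hl, PySem.Str.len_eq]
    have hb := word_len_bounds cur h0
    have hd1 := toChars_len_pos cur h0
    have hd10 := toChars_len_le_ten cur h0 h1
    -- l is a fixed point of the length map
    have hfix : PySem.Str.len (pvNumberToWord l) = l := by
      rw [hEq, ← hl]
    have hl4 : l = 4 := (fix_iff_four l (by omega) (by omega)).mp hfix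
    rw [hl4] at hEq
    have hcur9 : cur ≤ 9 := by
      by_contra hgt
      have := toChars_len_ge_two cur (by omega)
      omega
    have := word_four cur h0 hcur9 hEq.symm
    omega
  · intro h; rw [h]

-- lengths that arise are small
lemma len_le_bound (cur : Int) (h0 : 0 ≤ cur) (h1 : cur ≤ 2147483648) :
    0 ≤ PySem.Str.len (pvNumberToWord cur) ∧
      PySem.Str.len (pvNumberToWord cur) ≤ 2147483648 := by
  have hb := word_len_bounds cur h0
  have hd10 := toChars_len_le_ten cur h0 h1
  rw [PySem.Str.len_eq]
  omega

-- A's loop and B's recursion produce the same list, word for word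
lemma loop_eq (fuel : Nat) :
    ∀ (cur : Int), 0 ≤ cur → cur ≤ 2147483648 →
      pvLoopA fuel (pvNumberToWord cur) = pvChain fuel cur := by
  induction fuel with
  | zero =>
    intro cur h0 h1
    simp only [pvLoopA, pvChain, spell_eq cur h0]
  | succ fuel ih =>
    intro cur h0 h1
    simp only [pvLoopA, pvChain]
    rw [spell_eq cur h0]
    have hiff : (pvNumberToWord (PySem.Str.len (pvNumberToWord cur)) == pvNumberToWord cur)
        = (cur == (4 : Int)) := by
      by_cases h : cur = 4
      · subst h; decide
      · have h2 : ¬ pvNumberToWord (PySem.Str.len (pvNumberToWord cur)) = pvNumberToWord cur := by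
          intro hc
          exact h ((fix_iff_four cur h0 h1).mp ((stop_iff cur h0 h1).mp hc))
        rw [beq_eq_false_iff_ne.mpr h2, beq_eq_false_iff_ne.mpr h]
    rw [hiff]
    by_cases h : cur = 4
    · subst h; rw [if_pos (by decide), if_pos (by decide)]
    · rw [if_neg (by simp [h]), if_neg (by simp [h])]
      have hlb := len_le_bound cur h0 h1
      rw [ih (PySem.Str.len (pvNumberToWord cur)) hlb.1 hlb.2]

-- ===== VERDICT (by name: the statement is the Claim_ definition above) =====
theorem numbers_of_letters_spec : Claim_equal_numbers_of_letters := by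
  intro n hdom hpre
  unfold Spec_numbers_of_letters numbers_of_letters numbers_of_letters_alt
  have hb : n ≤ 2147483648 := by
    simp only [Dom_numbers_of_letters, pvDomInt, decide_eq_true_eq] at hdom
    omega
  exact loop_eq 64 n hpre hb
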